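-- pv_equiv track=rewrite | github.com/worldbridger-stack/clearbridge-skills | capabilities/engineering/infrastucture/git-worktree-manager/scripts/port_allocator.py | find_next_index
-- ===== SOURCE A (Python) =====
-- def find_next_index(registry):
--     """Find the lowest available index not in use."""
--     used_indices = set()
--     for alloc in registry["allocations"].values():
--         used_indices.add(alloc.get("index", 0))
--     idx = 0
--     while idx in used_indices:
--         idx += 1
--     return idx
-- ===== SOURCE B (Python) =====
-- def find_next_index(registry):
--     """Find the lowest available index not in use."""
--     expected = 0
--     for v in sorted(alloc.get("index", 0) for alloc in registry["allocations"].values()):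
--         if v < expected:
--             continue
--         if v == expected:
--             expected += 1
--         else:
--             break
--     return expected
-- ===== Notes on version B (the rewrite author's own statement) =====
-- stated objective: alternative
-- what changed: Replaces the set-membership probe loop (while idx in used: idx += 1) by a single sweep over the sorted index list with an expected counter that finds the first gap.
import Mathlib
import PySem

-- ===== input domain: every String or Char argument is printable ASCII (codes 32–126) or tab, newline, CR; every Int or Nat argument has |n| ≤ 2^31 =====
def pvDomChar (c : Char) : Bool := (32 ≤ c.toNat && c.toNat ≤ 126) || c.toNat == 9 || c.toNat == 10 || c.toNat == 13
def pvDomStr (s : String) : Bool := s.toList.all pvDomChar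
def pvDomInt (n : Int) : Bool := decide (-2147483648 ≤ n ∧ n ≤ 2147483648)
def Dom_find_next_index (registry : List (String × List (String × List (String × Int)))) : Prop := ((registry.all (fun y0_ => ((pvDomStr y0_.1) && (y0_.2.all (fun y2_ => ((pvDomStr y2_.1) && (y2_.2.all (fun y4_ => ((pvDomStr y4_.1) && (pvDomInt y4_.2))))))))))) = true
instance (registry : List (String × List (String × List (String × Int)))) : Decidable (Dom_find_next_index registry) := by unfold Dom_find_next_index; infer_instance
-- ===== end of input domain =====

-- B replaces A's set-membership probe loop by a single sweep over the sorted index list; alternative decomposition, return value only.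


-- ===== PORT A =====
-- the 'while idx in used: idx += 1' loop, made total with fuel = |used| + 1 (always enough, proved below)
def pvLoopA (used : PySem.Set Int) (idx : Int) : Nat → Int
  | 0 => idx
  | n + 1 => if idx ∈ used then pvLoopA used (idx + 1) n else idx

def find_next_index (registry : List (String × List (String × List (String × Int)))) : Int :=
  match PySem.Dict.get? (PySem.Dict.mk registry) "allocations" with
  | none => 0   -- KeyError in Python; excluded by Pre_
  | some allocs =>
    let used : PySem.Set Int :=
      (PySem.Dict.values (PySem.Dict.mk allocs)).foldl
        (fun s alloc => PySem.Set.add s (PySem.Dict.getD (PySem.Dict.mk alloc) "index" 0)) PySem.Set.empty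
    pvLoopA used 0 (used.length + 1)

-- ===== PORT B =====
-- the for-loop over the sorted values with continue/break, as structural recursion on the suffix
def pvSweep (e : Int) : List Int → Int
  | [] => e
  | v :: rest => if v < e then pvSweep e rest else if v = e then pvSweep (e + 1) rest else e

def find_next_index_alt (registry : List (String × List (String × List (String × Int)))) : Int :=
  match PySem.Dict.get? (PySem.Dict.mk registry) "allocations" with
  | none => 0   -- KeyError in Python; excluded by Pre_
  | some allocs =>
    pvSweep 0 (PySem.List.sorted
      ((PySem.Dict.values (PySem.Dict.mk allocs)).map (fun alloc => PySem.Dict.getD (PySem.Dict.mk alloc) "index" 0))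
      (fun x => x) false)

-- ===== PRECONDITION & SPEC =====
-- Pre_ excludes exactly the registries without an "allocations" key, where Python A raises KeyError.
def Pre_find_next_index (registry : List (String × List (String × List (String × Int)))) : Prop :=
  (PySem.Dict.get? (PySem.Dict.mk registry) "allocations").isSome = true
instance (registry : List (String × List (String × List (String × Int)))) : Decidable (Pre_find_next_index registry) := by unfold Pre_find_next_index; infer_instance

def pvWitness_find_next_index : (List (String × List (String × List (String × Int)))) :=
  [("allocations", [("wt1", [("index", 0)]), ("wt2", [("index", 2)])])]

def Spec_find_next_index (registry : List (String × List (String × List (String × Int)))) (out : Int) : Prop := out = find_next_index_alt registry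
instance (registry : List (String × List (String × List (String × Int)))) (out : Int) : Decidable (Spec_find_next_index registry out) := by unfold Spec_find_next_index; infer_instance

-- ===== CLAIM (what is proved, stated in full; the proofs are below) =====
def Claim_equal_find_next_index : Prop := ∀ (registry : List (String × List (String × List (String × Int)))), Dom_find_next_index registry → Pre_find_next_index registry → Spec_find_next_index registry (find_next_index registry)

-- ===== LEMMAS AND PROOFS =====

-- r is the least non-negative integer not occurring in S (characterises both results)
def pvIsMex (S : List Int) (r : Int) : Prop :=
  0 ≤ r ∧ r ∉ S ∧ ∀ j : Int, 0 ≤ j → j < r → j ∈ S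

theorem pvIsMex_unique {S T : List Int} {r r' : Int}
    (hme : ∀ x : Int, x ∈ S ↔ x ∈ T) (h : pvIsMex S r) (h' : pvIsMex T r') : r = r' := by
  obtain ⟨hr0, hrS, hrlt⟩ := h
  obtain ⟨hr0', hrT, hrlt'⟩ := h'
  rcases lt_trichotomy r r' with hlt | heq | hgt
  · exact absurd ((hme r).mpr (hrlt' r hr0 hlt)) hrS
  · exact heq
  · exact absurd ((hme r').mp (hrlt r' hr0' hgt)) hrT

theorem pvSweep_spec (l : List Int) (e : Int) (hs : l.Pairwise (· ≤ ·)) :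
    e ≤ pvSweep e l ∧ pvSweep e l ∉ l ∧ ∀ j : Int, e ≤ j → j < pvSweep e l → j ∈ l := by
  induction l generalizing e with
  | nil => exact ⟨le_refl e, by simp [pvSweep], fun j hj hj' => absurd (lt_of_le_of_lt hj hj') (lt_irrefl e)⟩
  | cons v rest ih =>
    have hle : ∀ y ∈ rest, v ≤ y := (List.pairwise_cons.mp hs).1
    have hs' : rest.Pairwise (· ≤ ·) := (List.pairwise_cons.mp hs).2
    by_cases h1 : v < e
    · obtain ⟨hge, hnm, hall⟩ := ih e hs'
      refine ⟨by simpa [pvSweep, h1] using hge, ?_, ?_⟩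
      · simp only [pvSweep, if_pos h1, List.mem_cons]
        rintro (heq | hm)
        · omega
        · exact hnm hm
      · intro j hj hj'
        simp only [pvSweep, if_pos h1] at hj'
        exact List.mem_cons_of_mem v (hall j hj hj')
    · by_cases h2 : v = e
      · obtain ⟨hge, hnm, hall⟩ := ih (e + 1) hs'
        refine ⟨by simp only [pvSweep, if_neg h1, if_pos h2]; omega, ?_, ?_⟩
        · simp only [pvSweep, if_neg h1, if_pos h2, List.mem_cons]
          rintro (heq | hm)
          · omega
          · exact hnm hm
        · intro j hj hj'
          simp only [pvSweep, if_neg h1, if_pos h2] at hj'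
          rcases eq_or_lt_of_le hj with heq | hlt
          · exact heq ▸ (h2 ▸ List.mem_cons_self)
          · exact List.mem_cons_of_mem v (hall j (by omega) hj')
      · refine ⟨by simp [pvSweep, h1, h2], ?_, ?_⟩
        · simp only [pvSweep, if_neg h1, if_neg h2, List.mem_cons]
          rintro (heq | hm)
          · exact h2 heq.symm
          · exact absurd (hle e hm) (by omega)
        · intro j hj hj'
          simp only [pvSweep, if_neg h1, if_neg h2] at hj'
          omega

theorem pvLoopA_spec (S : PySem.Set Int) :
    ∀ (n : Nat) (idx : Int), (∃ k : Nat, k < n ∧ idx + (k : Int) ∉ S) →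
      idx ≤ pvLoopA S idx n ∧ pvLoopA S idx n ∉ S ∧
        ∀ j : Int, idx ≤ j → j < pvLoopA S idx n → j ∈ S := by
  intro n
  induction n with
  | zero => rintro idx ⟨k, hk, -⟩; omega
  | succ n ih =>
    intro idx ⟨k, hk, hkn⟩
    by_cases hm : idx ∈ S
    · have hk0 : k ≠ 0 := by rintro rfl; simp at hkn; exact hkn hm
      obtain ⟨k', rfl⟩ := Nat.exists_eq_succ_of_ne_zero hk0
      obtain ⟨hge, hnm, hall⟩ := ih (idx + 1) ⟨k', by omega, by
        intro hmem; apply hkn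
        have he : idx + ((k' + 1 : Nat) : Int) = (idx + 1) + (k' : Int) := by push_cast; ring
        rw [he]; exact hmem⟩
      refine ⟨by simp only [pvLoopA, if_pos hm]; omega, by simpa [pvLoopA, hm] using hnm, ?_⟩
      intro j hj hj'
      simp only [pvLoopA, if_pos hm] at hj'
      rcases eq_or_lt_of_le hj with heq | hlt
      · exact heq ▸ hm
      · exact hall j (by omega) hj'
    · exact ⟨by simp [pvLoopA, hm], by simp [pvLoopA, hm], fun j hj hj' => by simp only [pvLoopA, if_neg hm] at hj'; omega⟩

-- fuel |used|+1 suffices: some value in 0..|used| is missing from the nodup list used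
theorem pvFuel_enough (S : PySem.Set Int) :
    ∃ k : Nat, k < S.length + 1 ∧ (0 : Int) + (k : Int) ∉ S := by
  by_contra h
  rw [not_exists] at h
  simp only [not_and, not_not] at h
  have hsub : (List.range (S.length + 1)).map (fun k : Nat => (k : Int)) ⊆ S := by
    intro x hx
    simp only [List.mem_map, List.mem_range] at hx
    obtain ⟨k, hk, rfl⟩ := hx
    simpa using h k hk
  have hnd' : ((List.range (S.length + 1)).map (fun k : Nat => (k : Int))).Nodup :=
    (List.nodup_range).map (fun a b => by exact_mod_cast id)
  have hle := (List.subperm_of_subset hnd' hsub).length_le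
  simp at hle

theorem find_next_index_agree (vals : List (List (String × Int))) :
    pvLoopA (vals.foldl (fun s alloc => PySem.Set.add s (PySem.Dict.getD (PySem.Dict.mk alloc) "index" 0)) PySem.Set.empty) 0
      ((vals.foldl (fun s alloc => PySem.Set.add s (PySem.Dict.getD (PySem.Dict.mk alloc) "index" 0)) PySem.Set.empty).length + 1)
    = pvSweep 0 (PySem.List.sorted (vals.map (fun alloc => PySem.Dict.getD (PySem.Dict.mk alloc) "index" 0)) (fun x => x) false) := by
  set f : List (String × Int) → Int := fun alloc => PySem.Dict.getD (PySem.Dict.mk alloc) "index" 0 with hf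
  have hused : (vals.foldl (fun s alloc => PySem.Set.add s (f alloc)) PySem.Set.empty)
      = PySem.Set.ofList (vals.map f) := by
    rw [PySem.Set.ofList_eq_foldl, List.foldl_map]
    rfl
  set used := vals.foldl (fun s alloc => PySem.Set.add s (f alloc)) PySem.Set.empty with hu
  set srt := PySem.List.sorted (vals.map f) (fun x => x) false with hsrt
  have hmem : ∀ x : Int, x ∈ used ∨ x ∉ used → (x ∈ used ↔ x ∈ srt) := by
    intro x _
    rw [hused, PySem.Set.mem_ofList, hsrt, PySem.List.mem_sorted]
  have hmemS : ∀ x : Int, x ∈ used ↔ x ∈ srt := fun x => hmem x (em _)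
  obtain ⟨hA0, hAnm, hAall⟩ := pvLoopA_spec used (used.length + 1) 0 (pvFuel_enough used)
  have hsorted : srt.Pairwise (· ≤ ·) := by
    have := PySem.List.sorted_pairwise (xs := vals.map f) (key := fun x => x)
    simpa using this
  obtain ⟨hB0, hBnm, hBall⟩ := pvSweep_spec srt 0 hsorted
  exact pvIsMex_unique hmemS ⟨hA0, hAnm, fun j hj hj' => hAall j hj hj'⟩
    ⟨hB0, hBnm, fun j hj hj' => hBall j hj hj'⟩

-- ===== VERDICT (by name: the statement is the Claim_ definition above) =====
theorem find_next_index_spec : Claim_equal_find_next_index := by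
  intro registry _ hpre
  unfold Spec_find_next_index find_next_index find_next_index_alt
  unfold Pre_find_next_index at hpre
  cases hget : PySem.Dict.get? (PySem.Dict.mk registry) "allocations" with
  | none => rw [hget] at hpre
  | some allocs =>
    exact find_next_index_agree (PySem.Dict.values (PySem.Dict.mk allocs))
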